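-- pv_equiv track=rewrite | github.com/AthifSaheer/zappyhire-python-assessmett | main.py | sum_ages
-- ===== SOURCE A (Python) =====
-- def sum_ages(person_list):
--     """
--     Given a list of dictionaries with 'name' and 'age' keys,
--     return a dictionary with unique ages as keys and the sum of ages as values.
--     """
--     dic = {}
--
--     for person in person_list:
--         if person["age"] in dic:
--             dic[person["age"]] += person["age"]
--         else:
--             dic[person["age"]] = person["age"]
--
--     return dic
-- ===== SOURCE B (Python) =====
-- def sum_ages(person_list):
--     # Dict-free: extract all ages, take the distinct ages in first-appearance
--     # order, and pair each with age * (number of occurrences).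
--     ages = [person["age"] for person in person_list]
--     return {a: a * ages.count(a) for a in dict.fromkeys(ages)}
-- ===== Notes on version B (the rewrite author's own statement) =====
-- stated objective: alternative
-- what changed: B drops A's accumulate-in-a-dict loop entirely: it extracts the list of ages, dedups it in first-appearance order, and computes each entry as age * ages.count(age), relying on sum-of-k-copies = k*age for integer ages.
import Mathlib
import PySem

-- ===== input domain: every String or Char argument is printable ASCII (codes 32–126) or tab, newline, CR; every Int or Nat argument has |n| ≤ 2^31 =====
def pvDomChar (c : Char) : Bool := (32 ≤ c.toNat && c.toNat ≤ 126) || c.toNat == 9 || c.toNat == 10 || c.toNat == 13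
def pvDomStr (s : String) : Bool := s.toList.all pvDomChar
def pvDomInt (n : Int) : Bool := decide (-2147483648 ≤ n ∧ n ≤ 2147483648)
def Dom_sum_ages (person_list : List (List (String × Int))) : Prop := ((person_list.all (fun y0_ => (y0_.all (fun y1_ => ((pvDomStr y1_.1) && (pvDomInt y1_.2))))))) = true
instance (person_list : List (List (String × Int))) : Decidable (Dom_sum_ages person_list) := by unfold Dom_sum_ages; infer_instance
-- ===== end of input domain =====

-- B replaces A's accumulate-in-a-dict loop by deduping the age list and pairing each distinct age with age * count.
-- ===== PORT A =====
-- person["age"]: first-match lookup in the association list; default 0 is unreachable under Pre_ ("age" key present)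
def pyAge (person : List (String × Int)) : Int :=
  PySem.Dict.getD ⟨person⟩ "age" 0

def sum_ages (person_list : List (List (String × Int))) : List (Int × Int) :=
  (person_list.foldl
    (fun (dic : PySem.Dict Int Int) person =>
      if dic.contains (pyAge person) then
        dic.insert (pyAge person) (dic.getD (pyAge person) 0 + pyAge person)
      else
        dic.insert (pyAge person) (pyAge person))
    PySem.Dict.empty).items

-- ===== PORT B =====
def sum_ages_alt (person_list : List (List (String × Int))) : List (Int × Int) :=
  let ages := person_list.map (fun person => pyAge person)
  (PySem.List.dedup ages).map (fun a => (a, a * (ages.count a : Int)))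

-- ===== PRECONDITION & SPEC =====
-- Pre_: every person has an "age" key (otherwise Python A raises KeyError and returns nothing)
def Pre_sum_ages (person_list : List (List (String × Int))) : Prop :=
  ∀ person ∈ person_list, "age" ∈ person.map (·.1)
instance (person_list : List (List (String × Int))) : Decidable (Pre_sum_ages person_list) := by unfold Pre_sum_ages; infer_instance

def pvWitness_sum_ages : (List (List (String × Int))) := [[("age", 3)], [("age", 3), ("name", 0)], [("age", 5)]]

def Spec_sum_ages (person_list : List (List (String × Int))) (out : List (Int × Int)) : Prop := out = sum_ages_alt person_list
instance (person_list : List (List (String × Int))) (out : List (Int × Int)) : Decidable (Spec_sum_ages person_list out) := by unfold Spec_sum_ages; infer_instance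

-- ===== CLAIM =====
def Claim_equal_sum_ages : Prop := ∀ (person_list : List (List (String × Int))), Dom_sum_ages person_list → Pre_sum_ages person_list → Spec_sum_ages person_list (sum_ages person_list)

-- ===== LEMMAS AND PROOFS =====

-- A's loop body is, in both branches, an insert of (old value or 0) + age
theorem sumA_eq_insert_getD (l : List (List (String × Int))) (d : PySem.Dict Int Int) :
    l.foldl
      (fun (dic : PySem.Dict Int Int) person =>
        if dic.contains (pyAge person) then
          dic.insert (pyAge person) (dic.getD (pyAge person) 0 + pyAge person)
        else
          dic.insert (pyAge person) (pyAge person))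
      d
    = l.foldl (fun dic person => dic.insert (pyAge person) (dic.getD (pyAge person) 0 + pyAge person)) d := by
  induction l generalizing d with
  | nil => rfl
  | cons p l ih =>
    simp only [List.foldl_cons]
    by_cases h : d.contains (pyAge p) = true
    · rw [if_pos h, ih]
    · rw [if_neg h, PySem.Dict.getD_of_not_contains (h := by simpa using h), zero_add, ih]

theorem getD_sum_loop (l : List (List (String × Int))) (d : PySem.Dict Int Int) (v : Int) :
    (l.foldl (fun dic person => dic.insert (pyAge person) (dic.getD (pyAge person) 0 + pyAge person)) d).getD v 0
    = d.getD v 0 + v * ((l.map pyAge).count v) := by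
  induction l generalizing d with
  | nil => simp
  | cons p l ih =>
    simp only [List.foldl_cons, List.map_cons, ih, PySem.Dict.getD_insert, List.count_cons]
    by_cases h : v = pyAge p
    · subst h; simp; ring
    · simp [h, Ne.symm h]

-- ===== VERDICT =====
theorem sum_ages_spec : Claim_equal_sum_ages := by
  intro pl _ _
  unfold Spec_sum_ages sum_ages sum_ages_alt
  rw [sumA_eq_insert_getD]
  have hk := PySem.Dict.keys_foldl_insert_key pl pyAge
    (f := fun (dic : PySem.Dict Int Int) person => dic.getD (pyAge person) 0 + pyAge person)
    (d := PySem.Dict.empty)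
  have hn := PySem.Dict.nodup_keys_foldl_insert_key pl pyAge
    (f := fun (dic : PySem.Dict Int Int) person => dic.getD (pyAge person) 0 + pyAge person)
    (d := PySem.Dict.empty) (by simp [PySem.Dict.empty])
  rw [PySem.Dict.items_eq_map_keys _ hn 0, hk]
  simp only [PySem.List.dedup_eq_ofList]
  have hupd : PySem.Set.update (PySem.Dict.empty (κ := Int) (ν := Int)).keys (pl.map pyAge)
      = PySem.Set.ofList (pl.map pyAge) := by
    simp [PySem.Dict.empty, PySem.Set.update_nil_left]
  rw [hupd]
  apply List.map_congr_left
  intro k _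
  simp only [getD_sum_loop, PySem.Dict.getD_empty, zero_add]
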